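-- pv_equiv track=rewrite | github.com/ellbur/little-stuff | fibhowmany.py | check_fib
-- ===== SOURCE A (Python) =====
-- def check_fib(nums):
--     for a in range(10):
--         for b in range(10):
--             table = [0] * 10
--             for i in nums:
--                 table[i] += 1
--
--             def follow(a, b):
--                 if sum(table) == 0:
--                     return True
--                 else:
--                     if table[a] <= 0:
--                         return False
--                     else:
--                         table[a] -= 1
--                         return follow(b, (a+b) % 10)
--
--             if follow(a, b):
--                 return True
--
--     return False
-- ===== SOURCE B (Python) =====
-- def check_fib(nums):
--     base = [0] * 10
--     for i in nums:
--         base[i] += 1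
--     total = len(nums)
--     for a in range(10):
--         for b in range(10):
--             table = base[:]
--             remaining = total
--             ca, cb = a, b
--             ok = True
--             while remaining > 0:
--                 if table[ca] == 0:
--                     ok = False
--                     break
--                 table[ca] -= 1
--                 remaining -= 1
--                 ca, cb = cb, (ca + cb) % 10
--             if ok:
--                 return True
--     return False
-- ===== Notes on version B (the rewrite author's own statement) =====
-- stated objective: alternative
-- what changed: B builds the digit-count table once instead of rebuilding it for each of the 100 starting pairs, and replaces A's recursive follow (which recomputes sum(table) at every step) by an iterative while-loop that counts down a single remaining counter.
import Mathlib
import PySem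

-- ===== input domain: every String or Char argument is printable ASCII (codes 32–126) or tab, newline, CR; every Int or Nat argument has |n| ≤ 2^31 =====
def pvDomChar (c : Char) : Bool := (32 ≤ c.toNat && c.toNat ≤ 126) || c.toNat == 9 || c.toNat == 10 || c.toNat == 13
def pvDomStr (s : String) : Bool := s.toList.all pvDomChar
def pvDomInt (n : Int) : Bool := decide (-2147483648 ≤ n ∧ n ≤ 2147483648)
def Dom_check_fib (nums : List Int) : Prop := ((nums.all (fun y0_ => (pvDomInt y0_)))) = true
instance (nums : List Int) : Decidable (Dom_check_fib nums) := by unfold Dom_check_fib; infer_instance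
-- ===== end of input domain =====

-- B builds the digit-count table once and replaces A's recursive `follow` (which re-sums the
-- table at every step) by an iterative countdown loop on a `remaining` counter; objective: alternative decomposition.


-- ===== PORT A =====
-- table[i] += 1 with Python's negative-index rule: for -10 ≤ i < 10 (guaranteed by Pre_)
-- the accessed cell is i mod 10 (Lean's Int % is nonnegative here, matching Python); exact on Pre_.
def pyBump (t : List Int) (i : Int) : List Int :=
  t.set (i % 10).toNat (t.getD (i % 10).toNat 0 + 1)

-- A's inner recursion `follow`; fuel = len(nums) = sum(table), so fuel runs out exactly when
-- the table is empty (the 0 case returns the same `sum == 0` test as the Python base case).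
def followA : Nat → List Int → Nat → Nat → Bool
  | 0, table, _, _ => table.sum == 0
  | fuel + 1, table, a, b =>
    if table.sum == 0 then true
    else if table.getD a 0 ≤ 0 then false
    else followA fuel (table.set a (table.getD a 0 - 1)) b ((a + b) % 10)

def check_fib (nums : List Int) : Bool :=
  (List.range 10).any (fun a =>
    (List.range 10).any (fun b =>
      let table := nums.foldl pyBump (List.replicate 10 (0 : Int))
      followA nums.length table a b))

-- ===== PORT B =====
-- B's while-loop: countdown on `remaining`; succeeds iff the counter reaches 0.
def trialB : Nat → List Int → Nat → Nat → Bool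
  | 0, _, _, _ => true
  | r + 1, table, ca, cb =>
    if table.getD ca 0 == 0 then false
    else trialB r (table.set ca (table.getD ca 0 - 1)) cb ((ca + cb) % 10)

def check_fib_alt (nums : List Int) : Bool :=
  let base := nums.foldl pyBump (List.replicate 10 (0 : Int))
  let total := nums.length
  (List.range 10).any (fun a =>
    (List.range 10).any (fun b => trialB total base a b))

-- ===== PRECONDITION & SPEC =====
-- Pre_ excludes exactly the inputs on which Python A raises IndexError (table[i] += 1 with i
-- outside the list's index range -10 … 9); B raises there too.
def Pre_check_fib (nums : List Int) : Prop := ∀ i ∈ nums, -10 ≤ i ∧ i < 10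
instance (nums : List Int) : Decidable (Pre_check_fib nums) := by unfold Pre_check_fib; infer_instance
def pvWitness_check_fib : List Int := [1, 1, 2, 3]

def Spec_check_fib (nums : List Int) (out : Bool) : Prop := out = check_fib_alt nums
instance (nums : List Int) (out : Bool) : Decidable (Spec_check_fib nums out) := by unfold Spec_check_fib; infer_instance

-- ===== CLAIM (what is proved, stated in full; the proofs are below) =====
def Claim_equal_check_fib : Prop := ∀ (nums : List Int), Dom_check_fib nums → Pre_check_fib nums → Spec_check_fib nums (check_fib nums)

-- ===== LEMMAS AND PROOFS =====

lemma sum_set_int (l : List Int) (i : Nat) (v : Int) (h : i < l.length) :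
    (l.set i v).sum = l.sum - l[i] + v := by
  rw [List.sum_set]
  have hd : l.drop i = l[i] :: l.drop (i + 1) := List.drop_eq_getElem_cons h
  have hs : (l.take i).sum + (l.drop i).sum = l.sum := by
    rw [← List.sum_append, List.take_append_drop]
  rw [hd] at hs
  simp only [List.sum_cons] at hs
  simp only [h, if_pos]
  omega

-- getD with default 0 on a nonneg list is nonneg, and positive only in range
lemma getD_pos_lt_length (l : List Int) (i : Nat) (h : ¬ l.getD i 0 ≤ 0) : i < l.length := by
  by_contra hge
  rw [List.getD_eq_default l 0 (by omega)] at h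
  exact h le_rfl

-- Core: A's recursion equals B's countdown loop when the counter equals the table sum.
lemma follow_eq_trial : ∀ (r fuel : Nat) (table : List Int) (a b : Nat),
    table.sum = (r : Int) → (∀ x ∈ table, 0 ≤ x) → r ≤ fuel →
    followA fuel table a b = trialB r table a b := by
  intro r
  induction r with
  | zero =>
    intro fuel table a b hsum _ _
    cases fuel with
    | zero => simp [followA, trialB, hsum]
    | succ f => simp [followA, trialB, hsum]
  | succ r ih =>
    intro fuel table a b hsum hnn hle
    cases fuel with
    | zero => omega
    | succ f =>
      have hsne : ¬ (table.sum == 0) = true := by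
        simp only [beq_iff_eq, hsum]
        push_cast
        omega
      by_cases hz : table.getD a 0 ≤ 0
      · -- entry is 0 (nonneg table): both fail
        have h0 : table.getD a 0 = 0 := by
          rcases Nat.lt_or_ge a table.length with hlt | hge
          · have hm := hnn _ (List.getElem_mem hlt)
            have hge := List.getD_eq_getElem table 0 hlt
            omega
          · exact List.getD_eq_default table 0 hge
        show followA (f + 1) table a b = trialB (r + 1) table a b
        unfold followA trialB
        rw [if_neg (by simpa using hsne), if_pos hz, if_pos (by simp only [beq_iff_eq]; exact h0)]
      · -- entry positive: both decrement and recurse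
        have hlt : a < table.length := getD_pos_lt_length table a hz
        have hg : table.getD a 0 = table[a] := List.getD_eq_getElem table 0 hlt
        have hz' : ¬ (table.getD a 0 == 0) = true := by simp only [beq_iff_eq]; omega
        show followA (f + 1) table a b = trialB (r + 1) table a b
        unfold followA trialB
        rw [if_neg (by simpa using hsne), if_neg hz, if_neg hz']
        apply ih
        · rw [sum_set_int table a _ hlt, hsum, hg]
          push_cast
          omega
        · intro x hx
          rcases List.mem_or_eq_of_mem_set hx with hx' | hx'
          · exact hnn x hx'
          · rw [hx', hg]; omega
        · omega

-- Invariant of the table-building fold: length 10, entries nonneg, sum = number of elements.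
lemma build_inv : ∀ (nums : List Int) (t : List Int), t.length = 10 → (∀ x ∈ t, 0 ≤ x) →
    (nums.foldl pyBump t).length = 10 ∧ (∀ x ∈ nums.foldl pyBump t, 0 ≤ x) ∧
      (nums.foldl pyBump t).sum = t.sum + nums.length := by
  intro nums
  induction nums with
  | nil => intro t hl hnn; simpa using ⟨hl, hnn⟩
  | cons i rest ih =>
    intro t hl hnn
    have hidx : (i % 10).toNat < t.length := by
      have h1 : 0 ≤ i % 10 := Int.emod_nonneg i (by omega)
      have h2 : i % 10 < 10 := Int.emod_lt_of_pos i (by omega)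
      omega
    have hg : t.getD (i % 10).toNat 0 = t[(i % 10).toNat] := List.getD_eq_getElem t 0 hidx
    have hstep := ih (pyBump t i)
      (by simp [pyBump, hl])
      (by
        intro x hx
        rcases List.mem_or_eq_of_mem_set hx with hx' | hx'
        · exact hnn x hx'
        · have := hnn _ (List.getElem_mem hidx)
          rw [hx', hg]; omega)
    rcases hstep with ⟨h1, h2, h3⟩
    refine ⟨h1, h2, ?_⟩
    rw [List.foldl_cons, h3]
    unfold pyBump
    rw [sum_set_int t _ _ hidx, hg]
    push_cast [List.length_cons]
    omega

lemma key (nums : List Int) (a b : Nat) :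
    followA nums.length (nums.foldl pyBump (List.replicate 10 (0 : Int))) a b
      = trialB nums.length (nums.foldl pyBump (List.replicate 10 (0 : Int))) a b := by
  obtain ⟨_, hnn, hsum⟩ := build_inv nums (List.replicate 10 (0 : Int)) (by simp)
    (by intro x hx; simp at hx; omega)
  exact follow_eq_trial nums.length nums.length _ a b (by simpa using hsum) hnn le_rfl

-- ===== VERDICT (by name: the statement is the Claim_ definition above) =====
theorem check_fib_spec : Claim_equal_check_fib := by
  intro nums _ _
  unfold Spec_check_fib check_fib check_fib_alt
  simp only [key]
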